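-- pv_equiv track=rewrite | github.com/LukovDev/CGDF | docs/api_doc_gen.py | brace_delta
-- ===== SOURCE A (Python) =====
-- def remove_line_comment(line: str) -> str:
--     in_str = False
--     str_ch = ""
--     esc = False
--     i = 0
--     while i < len(line):
--         ch = line[i]
--         if esc:
--             esc = False
--             i += 1
--             continue
--         if in_str:
--             if ch == "\\":
--                 esc = True
--             elif ch == str_ch:
--                 in_str = False
--             i += 1
--             continue
--         if ch in ("'", "\""):
--             in_str = True
--             str_ch = ch
--             i += 1
--             continue
--         if ch == "/" and i + 1 < len(line) and line[i + 1] == "/":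
--             return line[:i]
--         i += 1
--     return line
--
-- def brace_delta(line: str) -> int:
--     code = remove_line_comment(line)
--     in_str = False
--     str_ch = ""
--     esc = False
--     delta = 0
--     for ch in code:
--         if esc:
--             esc = False
--             continue
--         if in_str:
--             if ch == "\\":
--                 esc = True
--             elif ch == str_ch:
--                 in_str = False
--             continue
--         if ch in ("'", '"'):
--             in_str = True
--             str_ch = ch
--             continue
--         if ch == "{":
--             delta += 1
--         elif ch == "}":
--             delta -= 1
--     return delta
-- ===== SOURCE B (Python) =====
-- def brace_delta(line: str) -> int:
--     # Single fused pass: stop at '//' outside strings instead of truncating first.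
--     in_str = False
--     str_ch = ""
--     esc = False
--     delta = 0
--     n = len(line)
--     for i, ch in enumerate(line):
--         if esc:
--             esc = False
--         elif in_str:
--             if ch == "\\":
--                 esc = True
--             elif ch == str_ch:
--                 in_str = False
--         elif ch in ("'", '"'):
--             in_str = True
--             str_ch = ch
--         elif ch == "/" and i + 1 < n and line[i + 1] == "/":
--             return delta
--         elif ch == "{":
--             delta += 1
--         elif ch == "}":
--             delta -= 1
--     return delta
-- ===== Notes on version B (the rewrite author's own statement) =====
-- stated objective: simpler
-- what changed: Replaces A's two-pass structure (truncate the line at a comment with a helper, then rescan the truncated copy with a second string-state machine) by one self-contained loop that returns the running delta as soon as a comment start is seen outside a string.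
import Mathlib
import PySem

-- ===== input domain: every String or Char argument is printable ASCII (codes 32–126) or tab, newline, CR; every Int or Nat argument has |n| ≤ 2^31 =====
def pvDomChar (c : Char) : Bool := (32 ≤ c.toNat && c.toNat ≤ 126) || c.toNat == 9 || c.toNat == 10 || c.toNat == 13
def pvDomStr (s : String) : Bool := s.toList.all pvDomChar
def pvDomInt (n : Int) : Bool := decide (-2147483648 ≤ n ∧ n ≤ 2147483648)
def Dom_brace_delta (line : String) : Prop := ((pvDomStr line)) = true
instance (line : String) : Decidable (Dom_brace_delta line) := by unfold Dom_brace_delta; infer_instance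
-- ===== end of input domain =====

-- B fuses A's truncate-then-rescan two-pass structure into one pass that returns the
-- running delta at a '//' seen outside a string; return values proved equal on Dom.

-- ===== PORT A =====
-- A's remove_line_comment: while loop over indices; 'return line[:i]' at a '//' outside
-- a string becomes cutting off the rest here (the kept prefix is built by cons).
def pvRlcGo (in_str : Bool) (str_ch : Char) (esc : Bool) : List Char → List Char
  | [] => []
  | c :: rest =>
    if esc then c :: pvRlcGo in_str str_ch false rest
    else if in_str then
      if c = '\\' then c :: pvRlcGo in_str str_ch true rest
      else if c = str_ch then c :: pvRlcGo false str_ch esc rest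
      else c :: pvRlcGo in_str str_ch esc rest
    else if c = '\'' ∨ c = '"' then c :: pvRlcGo true c esc rest
    else if c = '/' ∧ rest.head? = some '/' then []
    else c :: pvRlcGo in_str str_ch esc rest

-- A's second loop: for ch in code, same string-state machine, counting braces.
def pvDeltaGo (in_str : Bool) (str_ch : Char) (esc : Bool) (delta : Int) : List Char → Int
  | [] => delta
  | c :: rest =>
    if esc then pvDeltaGo in_str str_ch false delta rest
    else if in_str then
      if c = '\\' then pvDeltaGo in_str str_ch true delta rest
      else if c = str_ch then pvDeltaGo false str_ch esc delta rest
      else pvDeltaGo in_str str_ch esc delta rest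
    else if c = '\'' ∨ c = '"' then pvDeltaGo true c esc delta rest
    else if c = '{' then pvDeltaGo in_str str_ch esc (delta + 1) rest
    else if c = '}' then pvDeltaGo in_str str_ch esc (delta - 1) rest
    else pvDeltaGo in_str str_ch esc delta rest

def brace_delta (line : String) : Int :=
  pvDeltaGo false ' ' false 0 (pvRlcGo false ' ' false line.toList)

-- ===== PORT B =====
-- Source B: one loop; 'line[i+1]' lookahead is the head of the remaining characters.
def pvFusedGo (in_str : Bool) (str_ch : Char) (esc : Bool) (delta : Int) : List Char → Int
  | [] => delta
  | c :: rest =>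
    if esc then pvFusedGo in_str str_ch false delta rest
    else if in_str then
      if c = '\\' then pvFusedGo in_str str_ch true delta rest
      else if c = str_ch then pvFusedGo false str_ch esc delta rest
      else pvFusedGo in_str str_ch esc delta rest
    else if c = '\'' ∨ c = '"' then pvFusedGo true c esc delta rest
    else if c = '/' ∧ rest.head? = some '/' then delta
    else if c = '{' then pvFusedGo in_str str_ch esc (delta + 1) rest
    else if c = '}' then pvFusedGo in_str str_ch esc (delta - 1) rest
    else pvFusedGo in_str str_ch esc delta rest

def brace_delta_alt (line : String) : Int :=
  pvFusedGo false ' ' false 0 line.toList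

-- ===== PRECONDITION & SPEC =====
def Spec_brace_delta (line : String) (out : Int) : Prop := out = brace_delta_alt line
instance (line : String) (out : Int) : Decidable (Spec_brace_delta line out) := by unfold Spec_brace_delta; infer_instance

-- ===== CLAIM (what is proved, stated in full; the proofs are below) =====
def Claim_equal_brace_delta : Prop := ∀ (line : String), Dom_brace_delta line → Spec_brace_delta line (brace_delta line)

-- ===== LEMMAS AND PROOFS =====

-- Both passes of A walk the kept prefix with the same string-state transitions as B's
-- single pass, so with a shared starting state the composition equals the fused loop.
theorem pvDelta_rlc_eq_fused (cs : List Char) :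
    ∀ (a : Bool) (b : Char) (e : Bool) (d : Int),
      pvDeltaGo a b e d (pvRlcGo a b e cs) = pvFusedGo a b e d cs := by
  induction cs with
  | nil => intro a b e d; simp [pvRlcGo, pvDeltaGo, pvFusedGo]
  | cons c rest ih =>
    intro a b e d
    simp only [pvRlcGo, pvFusedGo]
    by_cases he : e = true
    · simp [he, pvDeltaGo, ih]
    · simp only [if_neg he]
      by_cases hi : a = true
      · simp only [if_pos hi]
        by_cases hb : c = '\\'
        · simp [pvDeltaGo, he, hi, hb, ih]
        · by_cases hc : c = b
          · subst hc; simp [pvDeltaGo, he, hi, hb, ih]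
          · simp [pvDeltaGo, he, hi, hb, hc, ih]
      · simp only [if_neg hi]
        by_cases hq : c = '\'' ∨ c = '"'
        · simp [pvDeltaGo, he, hi, hq, ih]
        · simp only [if_neg hq]
          by_cases hs : c = '/' ∧ rest.head? = some '/'
          · simp [hs, pvDeltaGo]
          · simp only [if_neg hs]
            by_cases h1 : c = '{'
            · simp [pvDeltaGo, he, hi, h1, ih]
            · by_cases h2 : c = '}' <;> simp [pvDeltaGo, he, hi, hq, h1, h2, ih]

-- ===== VERDICT (by name: the statement is the Claim_ definition above) =====
theorem brace_delta_spec : Claim_equal_brace_delta := by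
  intro line _
  unfold Spec_brace_delta brace_delta brace_delta_alt
  exact pvDelta_rlc_eq_fused line.toList false ' ' false 0
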